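-- pv_equiv track=rewrite | github.com/ext-maru/ai-co | elders_guild/docs/analysis/placeholder_analysis_report.py | categorize_by_severity
-- ===== SOURCE A (Python) =====
-- from typing import Dict, List, Tuple
--
-- def categorize_by_severity(
--     filtered_results: Dict[str,
--     List[str]]
-- ) -> Dict[str, Dict[str, List[str]]]:
--     """深刻度別に分類"""
--
--     severity_classification = {
--         'critical': {
--             'unimplemented_functions': [],
--             'pass_only_functions': [],
--             'not_implemented_errors': []
--         },
--         'high': {
--             'empty_classes': [],
--             'mock_implementations': []
--         },
--         'medium': {
--
--             'placeholder_keywords': []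
--         },
--         'low': {
--             'syntax_errors': []
--         }
--     }
--
--     # 項目を深刻度別に分類
--     for category, items in filtered_results.items():
--         for severity, categories in severity_classification.items():
--             if category in categories:
--                 categories[category] = items
--                 break
--
--     return severity_classification
-- ===== SOURCE B (Python) =====
-- from typing import Dict, List
--
-- # Fixed taxonomy: severity -> category keys, in the original order.
-- TAXONOMY = {
--     'critical': ['unimplemented_functions', 'pass_only_functions', 'not_implemented_errors'],
--     'high': ['empty_classes', 'mock_implementations'],
--     'medium': ['placeholder_keywords'],
--     'low': ['syntax_errors'],
-- }
--
-- def categorize_by_severity(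
--     filtered_results: Dict[str, List[str]]
-- ) -> Dict[str, Dict[str, List[str]]]:
--     """深刻度別に分類"""
--     return {
--         severity: {cat: filtered_results.get(cat, []) for cat in cats}
--         for severity, cats in TAXONOMY.items()
--     }
-- ===== Notes on version B (the rewrite author's own statement) =====
-- stated objective: simpler
-- what changed: B inverts the traversal: instead of looping over the input and scanning the severity buckets with a membership test and break, it iterates the fixed severity-to-categories taxonomy once and fills every slot by a direct dict lookup with an empty-list default.
import Mathlib
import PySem

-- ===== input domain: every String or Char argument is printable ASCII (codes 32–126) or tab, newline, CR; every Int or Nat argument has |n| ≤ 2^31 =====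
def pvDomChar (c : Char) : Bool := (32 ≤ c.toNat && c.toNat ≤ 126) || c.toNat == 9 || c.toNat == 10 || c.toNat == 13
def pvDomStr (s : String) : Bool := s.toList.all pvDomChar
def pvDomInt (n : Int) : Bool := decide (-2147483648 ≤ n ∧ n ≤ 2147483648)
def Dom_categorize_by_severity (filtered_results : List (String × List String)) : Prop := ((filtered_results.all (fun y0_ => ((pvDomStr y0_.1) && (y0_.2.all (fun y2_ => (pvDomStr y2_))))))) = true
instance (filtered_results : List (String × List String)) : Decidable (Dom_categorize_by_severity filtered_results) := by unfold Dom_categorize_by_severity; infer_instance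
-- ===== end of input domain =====

-- B changes the traversal: it walks a fixed severity->categories taxonomy and fills each
-- slot by a direct lookup into filtered_results, instead of A's loop over the input that
-- scans the buckets with a membership test and break.  Objective: simpler.

-- ===== PORT A =====
-- 'categories[category] = items' on a dict whose keys already contain category:
-- overwrite in place, keeping position (hand port of the dict assignment; exact).
def pvSetEntry (cats : List (String × List String)) (k : String) (v : List String) :
    List (String × List String) :=
  cats.map (fun p => if p.1 == k then (k, v) else p)

-- the inner 'for severity, categories in …: if category in categories: …; break'
def pvAssign (category : String) (items : List String) :
    List (String × List (String × List String)) → List (String × List (String × List String))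
  | [] => []
  | (sev, cats) :: rest =>
    if (cats.map Prod.fst).contains category then
      (sev, pvSetEntry cats category items) :: rest
    else
      (sev, cats) :: pvAssign category items rest

def categorize_by_severity (filtered_results : List (String × List String)) :
    List (String × List (String × List String)) :=
  filtered_results.foldl (fun acc p => pvAssign p.1 p.2 acc)
    [("critical", [("unimplemented_functions", []), ("pass_only_functions", []),
                   ("not_implemented_errors", [])]),
     ("high", [("empty_classes", []), ("mock_implementations", [])]),
     ("medium", [("placeholder_keywords", [])]),
     ("low", [("syntax_errors", [])])]

-- ===== PORT B =====
def pvTaxonomy : List (String × List String) :=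
  [("critical", ["unimplemented_functions", "pass_only_functions", "not_implemented_errors"]),
   ("high", ["empty_classes", "mock_implementations"]),
   ("medium", ["placeholder_keywords"]),
   ("low", ["syntax_errors"])]

-- filtered_results.get(cat, [])
def pvGet (filtered_results : List (String × List String)) (c : String) : List String :=
  PySem.Dict.getD ⟨filtered_results⟩ c []

def categorize_by_severity_alt (filtered_results : List (String × List String)) :
    List (String × List (String × List String)) :=
  pvTaxonomy.map (fun p => (p.1, p.2.map (fun c => (c, pvGet filtered_results c))))

-- ===== PRECONDITION & SPEC =====
-- Pre_ excludes association lists with duplicate keys: these correspond to no Python dict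
-- input (a dict cannot hold a key twice), and on them A's overwrite keeps the last
-- occurrence while B's lookup keeps the first — either choice is accidental.
def Pre_categorize_by_severity (filtered_results : List (String × List String)) : Prop :=
  (filtered_results.map Prod.fst).Nodup
instance (filtered_results : List (String × List String)) : Decidable (Pre_categorize_by_severity filtered_results) := by unfold Pre_categorize_by_severity; infer_instance

def pvWitness_categorize_by_severity : (List (String × List String)) :=
  [("syntax_errors", ["x"]), ("other", [])]

def Spec_categorize_by_severity (filtered_results : List (String × List String)) (out : List (String × List (String × List String))) : Prop := out = categorize_by_severity_alt filtered_results
instance (filtered_results : List (String × List String)) (out : List (String × List (String × List String))) : Decidable (Spec_categorize_by_severity filtered_results out) := by unfold Spec_categorize_by_severity; infer_instance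

-- ===== CLAIM (what is proved, stated in full; the proofs are below) =====
def Claim_equal_categorize_by_severity : Prop := ∀ (filtered_results : List (String × List String)), Dom_categorize_by_severity filtered_results → Pre_categorize_by_severity filtered_results → Spec_categorize_by_severity filtered_results (categorize_by_severity filtered_results)

-- ===== LEMMAS AND PROOFS =====

-- B's result, abstracted over the lookup function.
def pvMkState (g : String → List String) : List (String × List (String × List String)) :=
  pvTaxonomy.map (fun p => (p.1, p.2.map (fun c => (c, g c))))

theorem pvAlt_eq_mkState (fr : List (String × List String)) :
    categorize_by_severity_alt fr = pvMkState (pvGet fr) := rfl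

theorem pvGet_append (p q : List (String × List String)) (c : String) :
    pvGet (p ++ q) c = if c ∈ p.map Prod.fst then pvGet p c else pvGet q c := by
  induction p with
  | nil => simp
  | cons x t ih =>
    obtain ⟨k, v⟩ := x
    by_cases hk : k = c
    · subst hk
      simp [pvGet, PySem.Dict.getD_eq_get?_getD, PySem.Dict.get?_mk_cons]
    · have : (k == c) = false := by simp [hk]
      simp only [List.cons_append, pvGet, PySem.Dict.getD_eq_get?_getD,
        PySem.Dict.get?_mk_cons, this, Bool.false_eq_true, if_false, List.map_cons,
        List.mem_cons]
      have hne : ¬ c = k := fun h => hk h.symm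
      simp only [hne, false_or]
      simpa [pvGet, PySem.Dict.getD_eq_get?_getD] using ih

theorem pvGet_single (c c' : String) (its : List String) :
    pvGet [(c, its)] c' = if c' = c then its else [] := by
  by_cases h : c' = c
  · subst h; simp [pvGet, PySem.Dict.getD_eq_get?_getD, PySem.Dict.get?_mk_cons]
  · have : (c == c') = false := by
      simp; exact fun hh => h hh.symm
    simp [pvGet, PySem.Dict.getD_eq_get?_getD, this, h, PySem.Dict.get?]

theorem pvGet_of_not_mem (p : List (String × List String)) (c : String)
    (h : c ∉ p.map Prod.fst) : pvGet p c = [] := by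
  induction p with
  | nil => rfl
  | cons x t ih =>
    obtain ⟨k, v⟩ := x
    simp only [List.map_cons, List.mem_cons, not_or] at h
    have hk : (k == c) = false := by
      simp; exact fun hh => h.1 hh.symm
    simp only [pvGet, PySem.Dict.getD_eq_get?_getD, PySem.Dict.get?_mk_cons, hk,
      Bool.false_eq_true, if_false]
    simpa [pvGet, PySem.Dict.getD_eq_get?_getD] using ih h.2

-- The assignment step, on a taxonomy-shaped state.
theorem pvAssign_mkState (c : String) (its : List String) (g : String → List String) :
    pvAssign c its (pvMkState g) = pvMkState (fun c' => if c' = c then its else g c') := by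
  by_cases h1 : c = "unimplemented_functions"
  · subst h1; simp [pvMkState, pvTaxonomy, pvAssign, pvSetEntry]
  by_cases h2 : c = "pass_only_functions"
  · subst h2; simp [pvMkState, pvTaxonomy, pvAssign, pvSetEntry]
  by_cases h3 : c = "not_implemented_errors"
  · subst h3; simp [pvMkState, pvTaxonomy, pvAssign, pvSetEntry]
  by_cases h4 : c = "empty_classes"
  · subst h4; simp [pvMkState, pvTaxonomy, pvAssign, pvSetEntry]
  by_cases h5 : c = "mock_implementations"
  · subst h5; simp [pvMkState, pvTaxonomy, pvAssign, pvSetEntry]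
  by_cases h6 : c = "placeholder_keywords"
  · subst h6; simp [pvMkState, pvTaxonomy, pvAssign, pvSetEntry]
  by_cases h7 : c = "syntax_errors"
  · subst h7; simp [pvMkState, pvTaxonomy, pvAssign, pvSetEntry]
  · simp [pvMkState, pvTaxonomy, pvAssign,
      Ne.symm h1, Ne.symm h2, Ne.symm h3, Ne.symm h4, Ne.symm h5, Ne.symm h6, Ne.symm h7,
      h1, h2, h3, h4, h5, h6, h7]

theorem pvMain (fr : List (String × List String)) (h : (fr.map Prod.fst).Nodup) :
    categorize_by_severity fr = pvMkState (pvGet fr) := by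
  induction fr using List.reverseRecOn with
  | nil => rfl
  | append_singleton p x ih =>
    obtain ⟨c, its⟩ := x
    have hmap : (p ++ [(c, its)]).map Prod.fst = p.map Prod.fst ++ [c] := by simp
    rw [hmap] at h
    have hp : (p.map Prod.fst).Nodup := (List.nodup_append.mp h).1
    have hc : c ∉ p.map Prod.fst := by
      intro hmem
      have := (List.nodup_append.mp h).2.2
      exact this c hmem c (by simp) rfl
    have hfold : categorize_by_severity (p ++ [(c, its)]) =
        pvAssign c its (categorize_by_severity p) := by
      simp [categorize_by_severity, List.foldl_append]
    rw [hfold, ih hp, pvAssign_mkState]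
    unfold pvMkState
    apply List.map_congr_left
    intro bucket hb
    refine congrArg _ ?_
    apply List.map_congr_left
    intro c' _
    refine congrArg _ ?_
    rw [pvGet_append]
    by_cases hc' : c' = c
    · subst hc'
      simp [hc, pvGet_single]
    · by_cases hmem : c' ∈ p.map Prod.fst
      · simp [hmem, hc']
      · simp [hmem, hc', pvGet_single, pvGet_of_not_mem p c' hmem]

-- ===== VERDICT (by name: the statement is the Claim_ definition above) =====
theorem categorize_by_severity_spec : Claim_equal_categorize_by_severity := by
  intro fr _ hpre
  unfold Spec_categorize_by_severity
  rw [pvMain fr hpre, pvAlt_eq_mkState]
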